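-- pv_equiv track=rewrite | github.com/tigantic/physics-os | apps/qtenet/src/qtenet/qtenet/solvers/vlasov_genuine.py | _x_bit_sites
-- ===== SOURCE A (Python) =====
-- def _x_bit_sites(
--     num_qubits_total: int, num_dims: int, x_axis: int
-- ) -> list[int]:
--     """Return sorted site indices for x-dimension bits."""
--     result = []
--     for k in range(num_qubits_total):
--         morton_bit = num_qubits_total - 1 - k
--         if morton_bit % num_dims == x_axis:
--             result.append(k)
--     return result
-- ===== SOURCE B (Python) =====
-- def _x_bit_sites(
--     num_qubits_total: int, num_dims: int, x_axis: int
-- ) -> list[int]: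
--     """Return sorted site indices for x-dimension bits."""
--     if not 0 <= x_axis < num_dims:
--         return []
--     # Morton bits congruent to x_axis are x_axis, x_axis+num_dims, ...;
--     # site k = num_qubits_total-1-bit, so count down from the smallest bit's site.
--     return list(range(num_qubits_total - 1 - x_axis, -1, -num_dims))[::-1]
-- ===== Notes on version B (the rewrite author's own statement) =====
-- stated objective: faster
-- what changed: B replaces A's scan of every k in range(num_qubits_total) with a modular test by emitting the matching sites directly as one range() arithmetic progression (O(output) instead of O(n)); Pre_ restricts to the natural domain num_dims >= 1 (or an empty qubit range): for negative num_dims A's nonempty results come from Python's negative-modulo convention and are accidental, and for num_dims == 0 with qubits present A raises ZeroDivisionError.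
-- outside the precondition, e.g. on _x_bit_sites(8, -3, -1): A returns [2, 5], B returns []
import Mathlib
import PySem

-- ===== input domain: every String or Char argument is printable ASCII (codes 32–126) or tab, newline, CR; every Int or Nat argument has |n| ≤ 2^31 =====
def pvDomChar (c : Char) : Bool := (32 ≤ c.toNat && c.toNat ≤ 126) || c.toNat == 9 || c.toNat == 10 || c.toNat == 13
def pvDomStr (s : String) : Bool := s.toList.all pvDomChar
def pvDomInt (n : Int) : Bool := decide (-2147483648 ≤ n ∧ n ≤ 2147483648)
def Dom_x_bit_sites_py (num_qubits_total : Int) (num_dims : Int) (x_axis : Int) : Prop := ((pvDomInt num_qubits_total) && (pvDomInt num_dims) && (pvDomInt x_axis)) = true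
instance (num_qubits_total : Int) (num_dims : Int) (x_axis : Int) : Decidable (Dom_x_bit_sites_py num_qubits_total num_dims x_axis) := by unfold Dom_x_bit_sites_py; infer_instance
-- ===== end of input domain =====

-- B emits the matching sites directly as one arithmetic progression (a single range)
-- instead of A's scan-and-test over all k: O(output) work instead of O(n).

-- ===== PORT A =====
def x_bit_sites_py (num_qubits_total : Int) (num_dims : Int) (x_axis : Int) : List Int :=
  (PySem.List.pyRange 0 num_qubits_total 1).foldl
    (fun result k =>
      let morton_bit := num_qubits_total - 1 - k
      if PySem.Int.mod morton_bit num_dims == x_axis then result ++ [k] else result)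
    []

-- ===== PORT B =====
def x_bit_sites_py_alt (num_qubits_total : Int) (num_dims : Int) (x_axis : Int) : List Int :=
  if ¬ (0 ≤ x_axis ∧ x_axis < num_dims) then []
  else
    -- list(range(num_qubits_total - 1 - x_axis, -1, -num_dims))[::-1]; [::-1] is .reverse
    (PySem.List.pyRange (num_qubits_total - 1 - x_axis) (-1) (-num_dims)).reverse

-- ===== PRECONDITION & SPEC =====
-- Pre_ restricts to the natural domain num_dims ≥ 1 (a dimension count), or an empty qubit
-- range where both return []: for negative num_dims A's nonempty results come from Python's
-- negative-modulo convention and are accidental, and for num_dims = 0 with qubits present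
-- A raises ZeroDivisionError.
def Pre_x_bit_sites_py (num_qubits_total : Int) (num_dims : Int) (x_axis : Int) : Prop :=
  0 < num_dims ∨ num_qubits_total ≤ 0
instance (num_qubits_total : Int) (num_dims : Int) (x_axis : Int) : Decidable (Pre_x_bit_sites_py num_qubits_total num_dims x_axis) := by unfold Pre_x_bit_sites_py; infer_instance
def pvWitness_x_bit_sites_py : Int × Int × Int := (8, 3, 1)

def Spec_x_bit_sites_py (num_qubits_total : Int) (num_dims : Int) (x_axis : Int) (out : List Int) : Prop := out = x_bit_sites_py_alt num_qubits_total num_dims x_axis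
instance (num_qubits_total : Int) (num_dims : Int) (x_axis : Int) (out : List Int) : Decidable (Spec_x_bit_sites_py num_qubits_total num_dims x_axis out) := by unfold Spec_x_bit_sites_py; infer_instance

-- ===== CLAIM =====
def Claim_equal_x_bit_sites_py : Prop := ∀ (num_qubits_total : Int) (num_dims : Int) (x_axis : Int), Dom_x_bit_sites_py num_qubits_total num_dims x_axis → Pre_x_bit_sites_py num_qubits_total num_dims x_axis → Spec_x_bit_sites_py num_qubits_total num_dims x_axis (x_bit_sites_py num_qubits_total num_dims x_axis)
-- ===== LEMMAS AND PROOFS =====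

-- a value a with 0 ≤ a < fk + s that is ≡ fk (mod s) must be fk itself
lemma pv_emod_eq_self_of_lt (s fk a : Int) (hs : 0 < s) (hfk0 : 0 ≤ fk) (hfks : fk < s)
    (ha0 : 0 ≤ a) (ha1 : a < fk + s) : a % s = fk ↔ a = fk := by
  constructor
  · intro h
    have hde := Int.ediv_add_emod a s
    have hq0 : 0 ≤ a / s := Int.ediv_nonneg ha0 (le_of_lt hs)
    rcases eq_or_lt_of_le hq0 with hq | hq
    · have hz : s * (a / s) = 0 := by rw [← hq]; ring
      omega
    · have h1 : (1 : Int) ≤ a / s := hq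
      have h2 : s * 1 ≤ s * (a / s) := mul_le_mul_of_nonneg_left h1 (le_of_lt hs)
      have : s ≤ s * (a / s) := by linarith [h2]
      omega
  · intro h; subst h; exact Int.emod_eq_of_lt hfk0 hfks

-- filter of an initial segment shorter than fk + s + 1 keeps at most the single element fk
lemma pv_filter_single (s fk : Int) (hs : 0 < s) (hfk0 : 0 ≤ fk) (hfks : fk < s) :
    ∀ (c : Nat) (n : Int), n = (c : Int) → n ≤ fk + s →
    (PySem.List.pyRange 0 n 1).filter (fun k => k % s == fk)
      = if fk < n then [fk] else [] := by
  intro c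
  induction c with
  | zero =>
      intro n hn _
      subst hn
      rw [PySem.List.pyRange_one_eq_nil (by omega)]
      simp; omega
  | succ c ih =>
      intro n hn hle
      have h1 : n = (c : Int) + 1 := by exact_mod_cast hn
      have hsplit : PySem.List.pyRange 0 n 1 = PySem.List.pyRange 0 (c : Int) 1 ++ [(c : Int)] := by
        rw [h1]; exact PySem.List.pyRange_one_succ_right (by positivity)
      rw [hsplit, List.filter_append]
      have ihc := ih (c : Int) rfl (by omega)
      rw [ihc]
      have hiff := pv_emod_eq_self_of_lt s fk (c : Int) hs hfk0 hfks (by positivity) (by omega)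
      by_cases hc : (c : Int) = fk
      · have hb : ((c : Int) % s == fk) = true := by
          simp only [beq_iff_eq]; exact hiff.mpr hc
        simp only [List.filter_cons, List.filter_nil, hb]
        have hA : ¬ fk < (c : Int) := by omega
        have hB : fk < n := by omega
        rw [if_neg hA, if_pos hB]
        simp [hc]
      · have hb : ((c : Int) % s == fk) = false := by
          simp only [beq_eq_false_iff_ne, ne_eq]
          intro h; exact hc (hiff.mp h)
        simp only [List.filter_cons, List.filter_nil, hb]
        by_cases hlt : fk < (c : Int)
        · have hB : fk < n := by omega
          rw [if_pos hlt, if_pos hB]; simp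
        · have hB : ¬ fk < n := by omega
          rw [if_neg hlt, if_neg hB]; simp

-- shift a unit-step range
lemma pv_pyRange_shift (a b t : Int) :
    PySem.List.pyRange (a + t) (b + t) 1 = (PySem.List.pyRange a b 1).map (· + t) := by
  rw [PySem.List.pyRange_one, PySem.List.pyRange_one]
  have h : (b + t - (a + t)) = b - a := by ring
  rw [h, List.map_map]
  congr 1
  funext k
  simp; ring

-- main progression lemma: filter of range(0,n) by a residue class is the progression fk, fk+s, …
lemma pv_filter_range_mod (s fk : Int) (hs : 0 < s) (hfk0 : 0 ≤ fk) (hfks : fk < s) :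
    ∀ (q : Nat) (n : Int), fk + ((q : Int) - 1) * s < n → n ≤ fk + (q : Int) * s →
    (PySem.List.pyRange 0 n 1).filter (fun k => k % s == fk)
      = (PySem.List.pyRange 0 (q : Int) 1).map (fun i => fk + i * s) := by
  intro q
  induction q with
  | zero =>
      intro n h1 h2
      simp only [Nat.cast_zero] at h1 h2 ⊢
      rw [PySem.List.pyRange_one_eq_nil (le_refl 0)]
      simp only [List.map_nil]
      by_cases hn : n ≤ 0
      · rw [PySem.List.pyRange_one_eq_nil hn]; simp
      · push_neg at hn
        rw [pv_filter_single s fk hs hfk0 hfks n.toNat n (by omega) (by push_cast at h2; omega)]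
        rw [if_neg (by push_cast at h2; omega)]
  | succ q ih =>
      intro n h1 h2
      have hq1 : ((q : Int) + 1 - 1) * s = (q : Int) * s := by ring
      push_cast at h1 h2 ⊢
      rw [hq1] at h1
      have hqs : 0 ≤ (q : Int) * s := by positivity
      have hrhs : PySem.List.pyRange 0 ((q : Int) + 1) 1
          = 0 :: PySem.List.pyRange 1 ((q : Int) + 1) 1 := by
        have := PySem.List.pyRange_one_cons (a := 0) (b := (q : Int) + 1) (by positivity)
        simpa using this
      by_cases hns : n ≤ fk + s
      · have hq0 : (q : Int) = 0 := by
          by_contra h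
          have hq' : (1 : Int) ≤ (q : Int) := by omega
          have : s * 1 ≤ (q : Int) * s := by
            calc s * 1 = 1 * s := by ring
            _ ≤ (q : Int) * s := mul_le_mul_of_nonneg_right hq' (le_of_lt hs)
          linarith
        rw [pv_filter_single s fk hs hfk0 hfks n.toNat n (by omega) hns]
        rw [if_pos (by rw [hq0] at h1; linarith)]
        rw [hq0] at hrhs ⊢
        simp only [zero_add] at hrhs
        norm_num
        rw [hrhs]
        rw [PySem.List.pyRange_one_eq_nil (le_refl 1)]
        simp
      · push_neg at hns
        have hsn : s ≤ n := by omega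
        rw [PySem.List.pyRange_one_append 0 s n (le_of_lt hs) hsn, List.filter_append]
        rw [pv_filter_single s fk hs hfk0 hfks s.toNat s (by omega) (by omega),
            if_pos hfks]
        have hshift : PySem.List.pyRange s n 1 = (PySem.List.pyRange 0 (n - s) 1).map (· + s) := by
          have := pv_pyRange_shift 0 (n - s) s
          simpa using this
        rw [hshift, List.filter_map]
        have hpred : ((fun k => k % s == fk) ∘ (· + s)) = (fun k : Int => k % s == fk) := by
          funext k
          simp only [Function.comp]
          congr 1
          have : k + s = k + s * 1 := by ring
          rw [this, Int.add_mul_emod_self_left]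
        rw [hpred]
        rw [ih (n - s) (by linarith) (by linarith)]
        rw [hrhs]
        have hshift2 : PySem.List.pyRange 1 ((q : Int) + 1) 1
            = (PySem.List.pyRange 0 (q : Int) 1).map (· + 1) := by
          have := pv_pyRange_shift 0 (q : Int) 1
          simpa using this
        rw [hshift2]
        simp only [List.map_map, List.map_cons]
        have hfun : ((fun x => x + s) ∘ fun i : Int => fk + i * s)
            = ((fun i : Int => fk + i * s) ∘ fun x => x + 1) := by
          funext i; simp [Function.comp]; ring
        rw [hfun]
        simp

-- A's loop condition, rewritten to a residue class of k
lemma pv_pred_shift (s m0 n k : Int) (hs : 0 < s) (hm0 : 0 ≤ m0) (hm0s : m0 < s) :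
    ((n - 1 - k) % s = m0) ↔ (k % s = (n - 1 - m0) % s) := by
  have hm0e : m0 % s = m0 := Int.emod_eq_of_lt hm0 hm0s
  constructor
  · intro h
    have h' : (n - 1 - k) % s = m0 % s := by rw [hm0e]; exact h
    have hd : s ∣ (n - 1 - k - m0) :=
      Int.dvd_of_emod_eq_zero (Int.emod_eq_emod_iff_emod_sub_eq_zero.mp h')
    have hd2 : s ∣ (k - (n - 1 - m0)) := by
      have he : k - (n - 1 - m0) = -(n - 1 - k - m0) := by ring
      rw [he]; exact dvd_neg.mpr hd
    exact Int.emod_eq_emod_iff_emod_sub_eq_zero.mpr (Int.emod_eq_zero_of_dvd hd2)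
  · intro h
    have hd : s ∣ (k - (n - 1 - m0)) :=
      Int.dvd_of_emod_eq_zero (Int.emod_eq_emod_iff_emod_sub_eq_zero.mp h)
    have hd2 : s ∣ (n - 1 - k - m0) := by
      have : n - 1 - k - m0 = -(k - (n - 1 - m0)) := by ring
      rw [this]; exact dvd_neg.mpr hd
    rw [← hm0e, Int.emod_eq_emod_iff_emod_sub_eq_zero]
    exact Int.emod_eq_zero_of_dvd hd2

-- core shape: A's filter as an explicit progression
lemma pv_core (s m0 n : Int) (hs : 0 < s) (hm0 : 0 ≤ m0) (hm0s : m0 < s) :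
    (PySem.List.pyRange 0 n 1).filter (fun k => (n - 1 - k) % s == m0)
      = if n - 1 < m0 then []
        else (PySem.List.pyRange 0 ((n - 1 - m0) / s + 1) 1).map
              (fun i => (n - 1 - m0) % s + i * s) := by
  have hcongr : (PySem.List.pyRange 0 n 1).filter (fun k => (n - 1 - k) % s == m0)
      = (PySem.List.pyRange 0 n 1).filter (fun k => k % s == (n - 1 - m0) % s) := by
    apply List.filter_congr
    intro k _
    rw [Bool.eq_iff_iff]
    simp only [beq_iff_eq]
    exact pv_pred_shift s m0 n k hs hm0 hm0s
  rw [hcongr]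
  by_cases hbr : n - 1 < m0
  · rw [if_pos hbr]
    apply List.filter_eq_nil_iff.mpr
    intro k hk
    rw [PySem.List.mem_pyRange_one] at hk
    simp only [beq_iff_eq]
    rw [← pv_pred_shift s m0 n k hs hm0 hm0s]
    have h1 : (0 : Int) ≤ n - 1 - k := by omega
    have h2 : n - 1 - k < s := by omega
    rw [Int.emod_eq_of_lt h1 h2]
    omega
  · rw [if_neg hbr]
    push_neg at hbr
    set fk := (n - 1 - m0) % s with hfk
    have hfk0 : 0 ≤ fk := Int.emod_nonneg _ (by omega)
    have hfks : fk < s := Int.emod_lt_of_pos _ hs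
    have hde := Int.ediv_add_emod (n - 1 - m0) s
    have hq0 : 0 ≤ (n - 1 - m0) / s := Int.ediv_nonneg (by omega) (le_of_lt hs)
    set qi := (n - 1 - m0) / s with hqi
    have hqnat : ((qi + 1).toNat : Int) = qi + 1 := by omega
    have hb1 : fk + (((qi + 1).toNat : Int) - 1) * s < n := by
      rw [hqnat]
      have : fk + (qi + 1 - 1) * s = n - 1 - m0 := by rw [← hde]; ring
      rw [this]; omega
    have hb2 : n ≤ fk + ((qi + 1).toNat : Int) * s := by
      rw [hqnat]
      have : fk + (qi + 1) * s = n - 1 - m0 + s := by rw [← hde]; ring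
      rw [this]; omega
    have := pv_filter_range_mod s fk hs hfk0 hfks (qi + 1).toNat n hb1 hb2
    rw [this, hqnat]

-- turn A's foldl into a filter
lemma pv_A_filter (n d x : Int) :
    x_bit_sites_py n d x
      = (PySem.List.pyRange 0 n 1).filter (fun k => PySem.Int.mod (n - 1 - k) d == x) := by
  unfold x_bit_sites_py
  simp only []
  rw [PySem.List.foldl_append_if_eq_filter]
  simp

-- B's reversed countdown range equals A's progression shape (a = n-1-x ≥ 0, step s > 0)
lemma pv_B_rev (s a : Int) (hs : 0 < s) (ha : 0 ≤ a) :
    (PySem.List.pyRange a (-1) (-s)).reverse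
      = (PySem.List.pyRange 0 (a / s + 1) 1).map (fun i => a % s + i * s) := by
  rw [PySem.List.pyRange_of_neg a (-1) (by omega)]
  have hif : ((-1 : Int) < a) := by omega
  rw [if_pos hif]
  have hcnt : ((a - -1 + - -s - 1) / - -s).toNat = (a / s + 1).toNat := by
    have h1 : a - -1 + - -s - 1 = a + s := by ring
    rw [h1, neg_neg]
    have h3 : a + s = a + 1 * s := by ring
    rw [h3, Int.add_mul_ediv_right a 1 (by omega)]
  rw [hcnt, PySem.List.pyRange_one]
  simp only [sub_zero]
  have hq0 : 0 ≤ a / s := Int.ediv_nonneg ha (le_of_lt hs)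
  set c : Nat := (a / s + 1).toNat with hc
  have hcInt : (c : Int) = a / s + 1 := by omega
  apply List.ext_getElem
  · simp
  · intro j h1 h2
    simp only [List.getElem_reverse, List.getElem_map, List.getElem_range, List.length_map,
      List.length_range] at h1 h2 ⊢
    have hde := Int.ediv_add_emod a s
    have hjc : j < c := by simpa using h2
    have : (↑(c - 1 - j) : Int) = (c : Int) - 1 - j := by omega
    rw [this, hcInt]
    push_cast
    have : a + -s * (a / s + 1 - 1 - (j : Int)) = (a - s * (a / s)) + s * j := by ring
    rw [this]
    have hm : a - s * (a / s) = a % s := by omega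
    rw [hm]
    ring

-- the modular test never fires when x is outside [0, d) (for d > 0)
lemma pv_mod_ne_of_out (d x m : Int) (hd : 0 < d) (hx : ¬ (0 ≤ x ∧ x < d)) :
    PySem.Int.mod m d ≠ x := by
  have hb1 := PySem.Int.mod_nonneg (a := m) (b := d) hd
  have hb2 := PySem.Int.mod_lt (a := m) (b := d) hd
  intro h; apply hx; omega

-- ===== VERDICT =====
theorem x_bit_sites_py_spec : Claim_equal_x_bit_sites_py := by
  intro n d x _ hpre
  unfold Spec_x_bit_sites_py
  rw [pv_A_filter]
  unfold x_bit_sites_py_alt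
  by_cases hn : n ≤ 0
  · -- empty qubit range: both sides []
    rw [PySem.List.pyRange_one_eq_nil hn]
    by_cases hx : ¬ (0 ≤ x ∧ x < d)
    · rw [if_pos hx]; simp
    · rw [if_neg hx]
      push_neg at hx
      rw [List.filter_nil]
      rw [PySem.List.pyRange_of_neg (n - 1 - x) (-1) (by omega)]
      rw [if_neg (by omega)]
      simp
  · push_neg at hn
    have hd : 0 < d := by
      rcases hpre with h | h
      · exact h
      · omega
    by_cases hx : ¬ (0 ≤ x ∧ x < d)
    · rw [if_pos hx]
      apply List.filter_eq_nil_iff.mpr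
      intro k _
      simp only [beq_iff_eq]
      exact pv_mod_ne_of_out d x (n - 1 - k) hd hx
    · rw [if_neg hx]
      push_neg at hx
      have hcongr : (PySem.List.pyRange 0 n 1).filter (fun k => PySem.Int.mod (n - 1 - k) d == x)
          = (PySem.List.pyRange 0 n 1).filter (fun k => (n - 1 - k) % d == x) := by
        apply List.filter_congr
        intro k _
        rw [PySem.Int.mod_eq_emod_of_pos hd]
      rw [hcongr, pv_core d x n hd hx.1 hx.2]
      by_cases hbr : n - 1 < x
      · rw [if_pos hbr]
        rw [PySem.List.pyRange_of_neg (n - 1 - x) (-1) (by omega)]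
        rw [if_neg (by omega)]
        simp
      · rw [if_neg hbr]
        push_neg at hbr
        exact (pv_B_rev d (n - 1 - x) hd (by omega)).symm
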